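-- pv_equiv track=rewrite | github.com/Jany26/tree-aut-lib | py/simulation.py | assignVariablesDict
-- ===== SOURCE A (Python) =====
-- def assignVariablesDict(num: int, size: int) -> dict:
--     result = []
--     division = num
--     for _ in range(size):
--         remainder = division % 2
--         division = division // 2
--         result.append(remainder)
--     result.reverse()
--     resultDict = {i+1: result[i] for i in range(size)}
--     return resultDict
-- ===== SOURCE B (Python) =====
-- def assignVariablesDict(num: int, size: int) -> dict:
--     # extract each bit directly by arithmetic shift (MSB first), no list/reverse
--     return {i + 1: (num >> (size - 1 - i)) & 1 for i in range(size)}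
-- ===== Notes on version B (the rewrite author's own statement) =====
-- stated objective: simpler
-- what changed: B is a one-line dict comprehension that reads each bit directly with an arithmetic shift ((num >> (size-1-i)) & 1), eliminating A's divide-and-remainder loop, the intermediate list, the reverse, and the indexed second pass.
import Mathlib
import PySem

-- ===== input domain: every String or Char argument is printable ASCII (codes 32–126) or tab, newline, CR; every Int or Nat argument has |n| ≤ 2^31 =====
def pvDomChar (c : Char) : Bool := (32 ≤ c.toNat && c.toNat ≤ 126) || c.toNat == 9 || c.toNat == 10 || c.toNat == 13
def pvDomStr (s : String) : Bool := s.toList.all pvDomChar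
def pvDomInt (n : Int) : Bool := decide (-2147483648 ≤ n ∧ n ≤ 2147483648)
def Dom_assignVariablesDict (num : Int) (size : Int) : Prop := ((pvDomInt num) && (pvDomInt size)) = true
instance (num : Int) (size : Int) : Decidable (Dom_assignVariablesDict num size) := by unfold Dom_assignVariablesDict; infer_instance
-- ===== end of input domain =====

-- B builds the dict in one pass, reading each bit with a shift, instead of A's
-- divide-loop + reverse + indexed dict comprehension (objective: simpler).

-- ===== PORT A =====
-- repeated divmod loop collecting remainders LSB-first, then reverse, then {i+1: result[i]}
def assignVariablesDict (num : Int) (size : Int) : List (Int × Int) :=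
  let st := (PySem.List.pyRange 0 size 1).foldl
      (fun (st : Int × List Int) _ =>
        (PySem.Int.floordiv st.1 2, st.2 ++ [PySem.Int.mod st.1 2]))
      (num, [])
  let result := st.2.reverse
  -- result[i]: i is always in range (len(result) = size), so the default never fires
  let d := (PySem.List.pyRange 0 size 1).foldl
      (fun (d : PySem.Dict Int Int) i =>
        d.insert (i + 1) (PySem.List.pyGetD result i 0))
      PySem.Dict.empty
  d.items

-- ===== PORT B =====
-- dict comprehension {i+1: (num >> (size-1-i)) & 1}; Python's >> on Int IS Lean's >>>
-- (shift count size-1-i is nonnegative for every i in range(size), so .toNat is exact)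
def assignVariablesDict_alt (num : Int) (size : Int) : List (Int × Int) :=
  (PySem.List.pyRange 0 size 1).map
    (fun i => (i + 1, PySem.Int.band (num >>> (size - 1 - i).toNat) 1))

-- ===== PRECONDITION & SPEC =====
def Spec_assignVariablesDict (num : Int) (size : Int) (out : List (Int × Int)) : Prop := out = assignVariablesDict_alt num size
instance (num : Int) (size : Int) (out : List (Int × Int)) : Decidable (Spec_assignVariablesDict num size out) := by unfold Spec_assignVariablesDict; infer_instance

-- ===== CLAIM (what is proved, stated in full; the proofs are below) =====
def Claim_equal_assignVariablesDict : Prop := ∀ (num : Int) (size : Int), Dom_assignVariablesDict num size → Spec_assignVariablesDict num size (assignVariablesDict num size)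

-- ===== LEMMAS AND PROOFS =====

-- floor division by 2 is an arithmetic right shift by one
theorem pv_floordiv_two_shift (d : Int) : PySem.Int.floordiv d 2 = d >>> (1:Nat) := by
  rw [PySem.Int.floordiv_eq_ediv_of_pos (by norm_num), Int.shiftRight_eq_div_pow]
  norm_num

theorem pv_shift_shift (d : Int) (j : Nat) : (d >>> (1:Nat)) >>> j = d >>> (1+j) := by
  simp only [Int.shiftRight_eq_div_pow, pow_add, pow_one]
  push_cast
  rw [Int.ediv_ediv_of_nonneg (by norm_num)]

-- A's remainder loop produces the LSB-first bit list
theorem pv_loopA {α : Type} (l : List α) (d : Int) (acc : List Int) :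
    (l.foldl (fun (st : Int × List Int) _ =>
        (PySem.Int.floordiv st.1 2, st.2 ++ [PySem.Int.mod st.1 2])) (d, acc)).2
      = acc ++ (List.range l.length).map (fun j : Nat => PySem.Int.mod (d >>> j) 2) := by
  induction l generalizing d acc with
  | nil => simp
  | cons x xs ih =>
    simp only [List.foldl_cons, List.length_cons]
    rw [ih, List.range_succ_eq_map, List.map_cons, List.map_map,
      List.append_assoc, List.singleton_append]
    congr 1
    congr 1
    · rw [Int.shiftRight_zero]
    · apply List.map_congr_left
      intro j _
      simp only [Function.comp_apply, pv_floordiv_two_shift, pv_shift_shift,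
        Nat.succ_eq_add_one, Nat.add_comm]

theorem pv_rev_map_range (g : Nat → Int) (n : Nat) :
    ((List.range n).map g).reverse = (List.range n).map (fun k => g (n-1-k)) := by
  apply List.ext_getElem
  · simp
  · intro i h1 h2
    simp only [List.length_map, List.length_range] at h1 h2
    rw [List.getElem_reverse]
    simp only [List.getElem_map, List.getElem_range, List.length_map, List.length_range]

-- ===== VERDICT (by name: the statement is the Claim_ definition above) =====
theorem assignVariablesDict_spec : Claim_equal_assignVariablesDict := by
  intro num size _
  unfold Spec_assignVariablesDict assignVariablesDict assignVariablesDict_alt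
  by_cases hs : 0 < size
  · obtain ⟨n, rfl⟩ : ∃ n : Nat, size = (n : Int) := ⟨size.toNat, by omega⟩
    rw [show PySem.List.pyRange 0 (n:Int) 1 = (List.range n).map (fun k : Nat => (k:Int)) from
      PySem.List.pyRange_zero_natCast n]
    simp only [List.foldl_map]
    rw [pv_loopA, List.nil_append, pv_rev_map_range]
    rw [PySem.Dict.items_foldl_insert_fresh _ _ _ _
      (by intro a _; simp [PySem.Dict.contains_empty])
      (by
        have : (List.map (fun k : Nat => (k:Int) + 1) (List.range n)).Nodup := by
          apply List.Nodup.map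
          · intro a b h
            simp only at h
            omega
          · exact List.nodup_range
        simpa using this)]
    simp only [PySem.Dict.empty, List.nil_append, List.map_map, Function.comp_def]
    apply List.map_congr_left
    intro k hk
    simp only [List.mem_range] at hk
    rw [PySem.List.pyGetD_eq_getElem _ 0 (by positivity) (by simpa using hk)]
    simp only [Int.toNat_natCast, List.getElem_map, List.getElem_range]
    rw [PySem.Int.band_one, show ((n:Int) - 1 - (k:Int)).toNat = n - 1 - k by omega]
    simp only [List.length_range]
  · have hr : PySem.List.pyRange 0 size 1 = [] := by
      simp [PySem.List.pyRange, show ¬ (0:Int) < size by omega]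
    simp [hr, PySem.Dict.empty]
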